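-- pv_equiv track=rewrite | github.com/Ag3497120/verantyx-v6 | arc/world_commands.py | slide_objs_to_touch
-- ===== SOURCE A (Python) =====
-- from collections import Counter, defaultdict
--
-- def _bg(g):
--     c = Counter()
--     for row in g: c.update(row)
--     return c.most_common(1)[0][0]
--
-- def _objects(g, bg, conn=4):
--     h, w = len(g), len(g[0])
--     vis = [[False]*w for _ in range(h)]
--     objs = []
--     ds = [(-1,0),(1,0),(0,-1),(0,1)]
--     if conn == 8: ds += [(-1,-1),(-1,1),(1,-1),(1,1)]
--     for r in range(h):
--         for c in range(w):
--             if not vis[r][c] and g[r][c] != bg: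
--                 obj = []; stk = [(r,c)]; vis[r][c] = True
--                 while stk:
--                     cr, cc = stk.pop()
--                     obj.append((cr,cc,g[cr][cc]))
--                     for dr,dc in ds:
--                         nr,nc = cr+dr, cc+dc
--                         if 0<=nr<h and 0<=nc<w and not vis[nr][nc] and g[nr][nc] != bg:
--                             vis[nr][nc] = True; stk.append((nr,nc))
--                 objs.append(obj)
--     return objs
--
-- def slide_objs_to_touch(g):
--     """各オブジェクトを下方向に、他のオブジェクトまたは壁に接触するまでスライド"""
--     bg=_bg(g); h,w=len(g),len(g[0])
--     objs=_objects(g,bg)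
--     objs.sort(key=lambda o: -max(r for r,c,v in o))  # bottom first
--     res=[[bg]*w for _ in range(h)]
--     occupied=set()
--     for obj in objs:
--         max_drop=h
--         for r,c,v in obj:
--             drop=0
--             while r+drop+1<h and (r+drop+1,c) not in occupied:
--                 drop+=1
--             max_drop=min(max_drop,drop)
--         for r,c,v in obj:
--             res[r+max_drop][c]=v
--             occupied.add((r+max_drop,c))
--     return res
-- ===== SOURCE B (Python) =====
-- def _bisect(a, x):
--     lo, hi = 0, len(a)
--     while lo < hi:
--         mid = (lo + hi) // 2
--         if x < a[mid]:
--             hi = mid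
--         else:
--             lo = mid + 1
--     return lo
--
-- def slide_objs_to_touch(g):
--     """Slide each object down until it touches another object or the wall.
--     Counts are built over the flattened grid; the flood fill marks whole
--     neighbour batches; occupancy is kept as a sorted row-list per column so a
--     cell's drop is one binary search; placements go in a dict rendered at the
--     end instead of an in-place grid."""
--     h, w = len(g), len(g[0])
--     counts = {}
--     for v in [v for row in g for v in row]:
--         counts[v] = counts.get(v, 0) + 1
--     bg = max(counts, key=lambda k: counts[k])
--     vis = set()
--     objs = []
--     for r0 in range(h):
--         for c0 in range(w):
--             if (r0, c0) in vis or g[r0][c0] == bg: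
--                 continue
--             vis.add((r0, c0))
--             stk = [(r0, c0)]
--             obj = []
--             while stk:
--                 r, c = stk.pop()
--                 obj.append((r, c, g[r][c]))
--                 nbrs = [(r + dr, c + dc) for dr, dc in ((-1, 0), (1, 0), (0, -1), (0, 1))
--                         if 0 <= r + dr < h and 0 <= c + dc < w
--                         and (r + dr, c + dc) not in vis and g[r + dr][c + dc] != bg]
--                 vis.update(nbrs)
--                 stk.extend(nbrs)
--             objs.append(obj)
--     objs.sort(key=lambda o: -max(r for r, _, _ in o))  # bottom first
--     cols = [[] for _ in range(w)]  # sorted occupied rows, per column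
--     placed = {}
--     for obj in objs:
--         d = h
--         for r, c, _ in obj:
--             col = cols[c]
--             i = _bisect(col, r)
--             d = min(d, (col[i] if i < len(col) else h) - r - 1)
--         for r, c, v in obj:
--             placed[(r + d, c)] = v
--             col = cols[c]
--             col.insert(_bisect(col, r + d), r + d)
--     return [[placed.get((r, c), bg) for c in range(w)] for r in range(h)]
-- ===== Notes on version B (the rewrite author's own statement) =====
-- stated objective: faster
-- what changed: B replaces A's per-cell row-by-row downward scan over an occupied-cell set by a binary search in per-column sorted row lists (with binary-search insertion), counts the background over the flattened grid with a plain dict and max(key=...), marks flood-fill neighbours in filtered batches, and renders the result from a placement dict at the end instead of writing an in-place grid.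
-- outside the precondition, e.g. on slide_objs_to_touch([]): A raises IndexError, B raises IndexError
import Mathlib
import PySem

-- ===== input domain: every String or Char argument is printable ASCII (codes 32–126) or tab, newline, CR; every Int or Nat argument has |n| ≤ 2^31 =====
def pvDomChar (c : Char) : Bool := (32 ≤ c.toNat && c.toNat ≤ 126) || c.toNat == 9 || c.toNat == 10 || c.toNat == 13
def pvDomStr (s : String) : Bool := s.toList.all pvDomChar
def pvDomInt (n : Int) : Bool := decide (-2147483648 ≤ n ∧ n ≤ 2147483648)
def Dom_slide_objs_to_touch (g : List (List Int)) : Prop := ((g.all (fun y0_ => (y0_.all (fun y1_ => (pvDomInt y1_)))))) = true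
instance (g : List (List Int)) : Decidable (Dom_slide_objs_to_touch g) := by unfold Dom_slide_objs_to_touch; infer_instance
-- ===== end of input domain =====

-- B replaces A's per-cell downward occupancy scan by a binary search in per-column sorted
-- row lists, counts the background over the flattened grid, marks flood-fill neighbours in
-- filtered batches, and renders the output from a placement dict instead of writing an
-- in-place grid (objective: faster sliding, measured; return value
-- only — A mutates nothing the caller sees).

-- ===== PORT A =====
-- g[r][c]; exact whenever the access is in range (each indexed access below is guarded so
-- under Pre_ it is in range when the Python runs)
def pvCell (g : List (List Int)) (r c : Int) : Int :=
  PySem.List.pyGetD (PySem.List.pyGetD g r []) c 0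

-- _bg: Counter built row by row; most_common(1)[0][0] is the first-inserted key of maximal
-- count (heapq.nlargest(1) ≡ stable descending sort, ties go to the earlier item); on an
-- empty counter Python raises IndexError — excluded by Pre_ (the [] branch is unreachable).
def pvMostCommon (c : PySem.Dict Int Int) : Int :=
  match c.items with
  | [] => 0
  | p :: rest => (rest.foldl (fun best q => if best.2 < q.2 then q else best) p).1

def pvBg (g : List (List Int)) : Int :=
  pvMostCommon (g.foldl (fun d row => row.foldl (fun d x => d.modify x 0 (· + 1)) d) PySem.Dict.empty)

def pvDs : List (Int × Int) := [(-1,0),(1,0),(0,-1),(0,1)]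

-- one neighbour check of the DFS inner `for dr,dc in ds:` loop (vis is the boolean matrix
-- of A, kept as the set of visited coordinates; stack top = list head, Python pushes/pops
-- at the end)
def pvStep (g : List (List Int)) (bg h w cr cc : Int)
    (s : PySem.Set (Int × Int) × List (Int × Int)) (d : Int × Int) :
    PySem.Set (Int × Int) × List (Int × Int) :=
  if 0 ≤ cr + d.1 ∧ cr + d.1 < h ∧ 0 ≤ cc + d.2 ∧ cc + d.2 < w ∧
      ¬ (s.1.contains (cr + d.1, cc + d.2) = true) ∧ pvCell g (cr + d.1) (cc + d.2) ≠ bg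
  then (s.1.add (cr + d.1, cc + d.2), (cr + d.1, cc + d.2) :: s.2)
  else s

-- termination measure helpers for the DFS `while stk:` loop (proof-internal)
def pvAllCells (h w : Int) : List (Int × Int) :=
  ((List.range h.toNat) ×ˢ (List.range w.toNat)).map (fun p => ((p.1 : Int), (p.2 : Int)))

def pvFree (h w : Int) (vis : PySem.Set (Int × Int)) : Nat :=
  ((pvAllCells h w).filter (fun p => !(vis.contains p))).length

lemma pvAllCells_nodup (h w : Int) : (pvAllCells h w).Nodup := by
  unfold pvAllCells
  refine List.Nodup.map ?_ (List.Nodup.product List.nodup_range List.nodup_range)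
  intro a b hab
  have h1 := congrArg Prod.fst hab
  have h2 := congrArg Prod.snd hab
  simp only at h1 h2
  exact Prod.ext (by exact_mod_cast h1) (by exact_mod_cast h2)

lemma pvAllCells_mem (h w : Int) (p : Int × Int)
    (h1 : 0 ≤ p.1) (h2 : p.1 < h) (h3 : 0 ≤ p.2) (h4 : p.2 < w) : p ∈ pvAllCells h w := by
  unfold pvAllCells
  rw [List.mem_map]
  refine ⟨(p.1.toNat, p.2.toNat), ?_, ?_⟩
  · rw [List.mem_product]
    constructor <;> rw [List.mem_range] <;> omega
  · simp only
    exact Prod.ext (by omega) (by omega)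

lemma pvContains_add (vis : PySem.Set (Int × Int)) (p q : Int × Int) :
    (vis.add p).contains q = (vis.contains q || decide (q = p)) := by
  by_cases hq : q ∈ vis.add p
  · have h1 : (vis.add p).contains q = true := (PySem.Set.contains_iff _ _).mpr hq
    rw [PySem.Set.mem_add] at hq
    rcases hq with hm | he
    · simp [h1, (PySem.Set.contains_iff _ _).mpr hm]
    · simp [h1, he]
  · have h1 : (vis.add p).contains q = false := by
      rw [← Bool.not_eq_true, PySem.Set.contains_iff]; exact hq
    rw [PySem.Set.mem_add] at hq
    push_neg at hq
    have h2 : vis.contains q = false := by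
      rw [← Bool.not_eq_true, PySem.Set.contains_iff]; exact hq.1
    simp [h1, h2, hq.2]

lemma pvFilter_add_len (vis : PySem.Set (Int × Int)) (p : Int × Int) (l : List (Int × Int))
    (hnd : l.Nodup) (hmem : p ∈ l) (hnot : vis.contains p = false) :
    (l.filter (fun q => !((vis.add p).contains q))).length + 1 =
      (l.filter (fun q => !(vis.contains q))).length := by
  induction l with
  | nil => simp at hmem
  | cons q t ih =>
    rcases List.mem_cons.mp hmem with hq | ht
    · subst hq
      have hpt : p ∉ t := (List.nodup_cons.mp hnd).1
      have htf : t.filter (fun q => !((vis.add p).contains q)) = t.filter (fun q => !(vis.contains q)) := by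
        apply List.filter_congr
        intro q hq
        rw [pvContains_add]
        have : q ≠ p := fun he => hpt (he ▸ hq)
        simp [this]
      have hP' : (!((vis.add p).contains p)) = false := by rw [pvContains_add, hnot]; simp
      have hP : (!(vis.contains p)) = true := by rw [hnot]; rfl
      rw [List.filter_cons, List.filter_cons, hP', hP, htf]
      simp
    · have hqp : q ≠ p := fun he => (List.nodup_cons.mp hnd).1 (he ▸ ht)
      have iht := ih (List.nodup_cons.mp hnd).2 ht
      have hc : (!((vis.add p).contains q)) = (!(vis.contains q)) := by
        rw [pvContains_add]; simp [hqp]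
      rw [List.filter_cons, List.filter_cons, hc]
      split
      · simp only [List.length_cons]; omega
      · omega

lemma pvFree_add (h w : Int) (vis : PySem.Set (Int × Int)) (p : Int × Int)
    (hmem : p ∈ pvAllCells h w) (hnot : vis.contains p = false) :
    pvFree h w (vis.add p) + 1 = pvFree h w vis :=
  pvFilter_add_len vis p (pvAllCells h w) (pvAllCells_nodup h w) hmem hnot

lemma pvStep_measure (g : List (List Int)) (bg h w cr cc : Int)
    (s : PySem.Set (Int × Int) × List (Int × Int)) (d : Int × Int) :
    5 * pvFree h w (pvStep g bg h w cr cc s d).1 + (pvStep g bg h w cr cc s d).2.length ≤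
      5 * pvFree h w s.1 + s.2.length := by
  unfold pvStep
  split
  · rename_i hcond
    obtain ⟨h1, h2, h3, h4, h5, _⟩ := hcond
    have hmem := pvAllCells_mem h w (cr + d.1, cc + d.2) h1 h2 h3 h4
    have hnot : s.1.contains (cr + d.1, cc + d.2) = false := by
      rw [← Bool.not_eq_true]; exact h5
    have := pvFree_add h w s.1 (cr + d.1, cc + d.2) hmem hnot
    simp only [List.length_cons]
    omega
  · exact le_refl _

lemma pvFold_measure (g : List (List Int)) (bg h w cr cc : Int)
    (l : List (Int × Int)) (s : PySem.Set (Int × Int) × List (Int × Int)) :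
    5 * pvFree h w (l.foldl (pvStep g bg h w cr cc) s).1 + (l.foldl (pvStep g bg h w cr cc) s).2.length ≤
      5 * pvFree h w s.1 + s.2.length := by
  induction l generalizing s with
  | nil => exact le_refl _
  | cons d t ih => exact le_trans (ih _) (pvStep_measure g bg h w cr cc s d)

-- the `while stk:` DFS loop of _objects
def pvDfs (g : List (List Int)) (bg h w : Int)
    (vis : PySem.Set (Int × Int)) (stk : List (Int × Int)) (obj : List (Int × Int × Int)) :
    PySem.Set (Int × Int) × List (Int × Int × Int) :=
  match stk with
  | [] => (vis, obj)
  | (cr, cc) :: rest =>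
    let st := pvDs.foldl (pvStep g bg h w cr cc) (vis, rest)
    pvDfs g bg h w st.1 st.2 (obj ++ [(cr, cc, pvCell g cr cc)])
  termination_by 5 * pvFree h w vis + stk.length
  decreasing_by
    have hh := pvFold_measure g bg h w cr cc pvDs (vis, rest)
    simp only [List.length_cons] at hh ⊢
    omega

-- _objects(g, bg) with conn = 4 (the only call)
def pvObjects (g : List (List Int)) (bg : Int) : List (List (Int × Int × Int)) :=
  let h : Int := (g.length : Int)
  let w : Int := ((g.headD []).length : Int)
  ((PySem.List.pyRange 0 h 1).foldl (fun (st : PySem.Set (Int × Int) × List (List (Int × Int × Int))) r =>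
      (PySem.List.pyRange 0 w 1).foldl (fun st c =>
        if ¬ (st.1.contains (r, c) = true) ∧ pvCell g r c ≠ bg then
          let res := pvDfs g bg h w (st.1.add (r, c)) [(r, c)] []
          (res.1, st.2 ++ [res.2])
        else st) st)
    (PySem.Set.empty, [])).2

-- max(r for r,c,v in o); Python raises ValueError on an empty object — objects are never
-- empty, the none branch is unreachable
def pvMaxRow (o : List (Int × Int × Int)) : Int :=
  match PySem.List.max? o (fun t => t.1) with
  | some t => t.1
  | none => 0

-- res[r][c] = v (exact while both indices are in range, which the proofs establish)
def pvSet2 (res : List (List Int)) (r c v : Int) : List (List Int) :=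
  PySem.List.pySetD res r (PySem.List.pySetD (PySem.List.pyGetD res r []) c v)

-- `drop=0; while r+drop+1<h and (r+drop+1,c) not in occupied: drop+=1` — fuel
-- (h-r-1).toNat bounds the iteration count exactly, so exhaustion coincides with the
-- loop's own exit condition
def pvScanGo (occ : PySem.Set (Int × Int)) (h c r drop : Int) : Nat → Int
  | 0 => drop
  | fuel + 1 =>
    if r + drop + 1 < h ∧ ¬ (occ.contains (r + drop + 1, c) = true)
    then pvScanGo occ h c r (drop + 1) fuel
    else drop

def pvScanDrop (occ : PySem.Set (Int × Int)) (h c r : Int) : Int :=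
  pvScanGo occ h c r 0 (h - r - 1).toNat

def slide_objs_to_touch (g : List (List Int)) : List (List Int) :=
  let bg := pvBg g
  let h : Int := (g.length : Int)
  let w : Int := ((g.headD []).length : Int)
  let objs := PySem.List.sorted (pvObjects g bg) (fun o => -(pvMaxRow o)) false
  let res0 : List (List Int) := List.replicate h.toNat (List.replicate w.toNat bg)
  let fin := objs.foldl (fun (st : List (List Int) × PySem.Set (Int × Int)) obj =>
      let maxDrop := obj.foldl (fun md t => min md (pvScanDrop st.2 h t.2.1 t.1)) h
      obj.foldl (fun st t =>
          (pvSet2 st.1 (t.1 + maxDrop) t.2.1 t.2.2, st.2.add (t.1 + maxDrop, t.2.1))) st)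
    (res0, PySem.Set.empty)
  fin.1

-- ===== PORT B =====
-- g[r][c] for the nonnegative in-range indices produced by Source B's range loops and bound
-- checks (exact there)
def pbCell (g : List (List Int)) (r c : Int) : Int :=
  (g.getD r.toNat []).getD c.toNat 0

-- counts over the flattened grid, then max(counts, key=...): first key of maximal count
-- (max() on an empty dict raises ValueError — excluded by Pre_, the [] branch is unreachable)
def pbPick (counts : PySem.Dict Int Int) : Int :=
  match counts.keys with
  | [] => 0
  | k :: ks => ks.foldl (fun best k' => if counts.getD best 0 < counts.getD k' 0 then k' else best) k

def pbBg (g : List (List Int)) : Int :=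
  pbPick ((g.flatMap id).foldl (fun d v => d.insert v (d.getD v 0 + 1)) PySem.Dict.empty)

-- the neighbour-batch comprehension of Source B's while loop
def pbNbrs (g : List (List Int)) (bg h w : Int) (vis : PySem.Set (Int × Int)) (r c : Int) :
    List (Int × Int) :=
  ([(-1,0),(1,0),(0,-1),(0,1)] : List (Int × Int)).filterMap (fun d =>
    if 0 ≤ r + d.1 ∧ r + d.1 < h ∧ 0 ≤ c + d.2 ∧ c + d.2 < w ∧
        (r + d.1, c + d.2) ∉ vis ∧ pbCell g (r + d.1) (c + d.2) ≠ bg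
    then some (r + d.1, c + d.2) else none)

-- Source B's `while stk:` flood-fill loop; the fuel only bounds the iteration count (each
-- iteration pops one entry and pushes at most the unvisited cells, so 5·h·w+1 is proved
-- sufficient below) — it never changes what is computed
def pbFill (g : List (List Int)) (bg h w : Int) :
    Nat → PySem.Set (Int × Int) → List (Int × Int) → List (Int × Int × Int) →
    PySem.Set (Int × Int) × List (Int × Int × Int)
  | _, vis, [], obj => (vis, obj)
  | 0, vis, _, obj => (vis, obj)
  | fuel + 1, vis, (r, c) :: rest, obj =>
    let nbrs := pbNbrs g bg h w vis r c
    pbFill g bg h w fuel (vis.update nbrs) (nbrs.reverse ++ rest) (obj ++ [(r, c, pbCell g r c)])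

-- the `for r0 in range(h): for c0 in range(w):` scan with its continue-guard
def pbObjects (g : List (List Int)) (bg h w : Int) : List (List (Int × Int × Int)) :=
  ((List.range h.toNat).foldl (fun (st : PySem.Set (Int × Int) × List (List (Int × Int × Int))) (r0 : Nat) =>
      (List.range w.toNat).foldl (fun st (c0 : Nat) =>
        if ((r0 : Int), (c0 : Int)) ∈ st.1 ∨ pbCell g (r0 : Int) (c0 : Int) = bg then st
        else
          let res := pbFill g bg h w (5 * (h.toNat * w.toNat) + 1)
            (st.1.add ((r0 : Int), (c0 : Int))) [((r0 : Int), (c0 : Int))] []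
          (res.1, st.2 ++ [res.2])) st)
    (PySem.Set.empty, [])).2

-- max(r for r, _, _ in o): first element, then strict improvements
def pbMaxRow (o : List (Int × Int × Int)) : Int :=
  match o with
  | [] => 0
  | t :: rest => rest.foldl (fun m x => if m < x.1 then x.1 else m) t.1

-- the final list comprehension: placed.get((r, c), bg) over all grid positions
def pbRender (h w : Int) (placed : PySem.Dict (Int × Int) Int) (bg : Int) : List (List Int) :=
  (List.range h.toNat).map (fun (r : Nat) =>
    (List.range w.toNat).map (fun (c : Nat) => placed.getD ((r : Int), (c : Int)) bg))

-- Source B's hand-written _bisect(a, x) is the textbook binary-search loop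
-- `while lo<hi: mid=(lo+hi)//2; if x<a[mid]: hi=mid else: lo=mid+1`, which is
-- PySem.List.bisectRight step for step.  cols[c] / cols[c]=… use .getD/.set with c.toNat:
-- c is a grid column, 0 ≤ c < w whenever Source B runs them.
def slide_objs_to_touch_alt (g : List (List Int)) : List (List Int) :=
  let h : Int := (g.length : Int)
  let w : Int := ((g.headD []).length : Int)
  let bg := pbBg g
  let objs := PySem.List.sorted (pbObjects g bg h w) (fun o => -(pbMaxRow o)) false
  let fin := objs.foldl (fun (st : List (List Int) × PySem.Dict (Int × Int) Int) obj =>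
      let d := obj.foldl (fun d t =>
          let col := st.1.getD t.2.1.toNat []
          let i := PySem.List.bisectRight col t.1
          min d (col[i]?.getD h - t.1 - 1)) h
      obj.foldl (fun st t =>
          let col := st.1.getD t.2.1.toNat []
          (st.1.set t.2.1.toNat
             (PySem.List.insert col ((PySem.List.bisectRight col (t.1 + d) : Nat) : Int) (t.1 + d)),
           st.2.insert (t.1 + d, t.2.1) t.2.2)) st)
    (List.replicate w.toNat ([] : List Int), PySem.Dict.empty)
  pbRender h w fin.2 bg

-- ===== PRECONDITION & SPEC =====
-- Pre_ excludes exactly the inputs on which A raises: grids whose rows are all empty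
-- (Counter.most_common(1)[0] → IndexError, including g = []) and ragged grids with a row
-- shorter than the first one (g[r][c] → IndexError); A returns on every other input.
def Pre_slide_objs_to_touch (g : List (List Int)) : Prop :=
  (∃ row ∈ g, row ≠ []) ∧ ∀ row ∈ g, (g.headD []).length ≤ row.length
instance (g : List (List Int)) : Decidable (Pre_slide_objs_to_touch g) := by
  unfold Pre_slide_objs_to_touch; infer_instance

def pvWitness_slide_objs_to_touch : List (List Int) := [[1, 0], [0, 0]]

def Spec_slide_objs_to_touch (g : List (List Int)) (out : List (List Int)) : Prop :=
  out = slide_objs_to_touch_alt g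
instance (g : List (List Int)) (out : List (List Int)) : Decidable (Spec_slide_objs_to_touch g out) := by
  unfold Spec_slide_objs_to_touch; infer_instance

-- ===== CLAIM (what is proved, stated in full; the proofs are below) =====
def Claim_equal_slide_objs_to_touch : Prop :=
  ∀ (g : List (List Int)), Dom_slide_objs_to_touch g → Pre_slide_objs_to_touch g →
    Spec_slide_objs_to_touch g (slide_objs_to_touch g)

-- ===== LEMMAS AND PROOFS =====

theorem slide_objs_to_touch_wit : Dom_slide_objs_to_touch pvWitness_slide_objs_to_touch ∧
    Pre_slide_objs_to_touch pvWitness_slide_objs_to_touch := by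
  constructor <;> decide

lemma pbCell_eq (g : List (List Int)) {r c : Int} (hr : 0 ≤ r) (hc : 0 ≤ c) :
    pbCell g r c = pvCell g r c := by
  unfold pbCell pvCell
  rw [PySem.List.pyGetD_of_nonneg _ _ hr, PySem.List.pyGetD_of_nonneg _ _ hc]

-- ---------- background ----------

lemma pbCounts_nested (f : PySem.Dict Int Int → Int → PySem.Dict Int Int) :
    ∀ (g : List (List Int)) (d : PySem.Dict Int Int),
      g.foldl (fun d row => row.foldl f d) d = (g.flatMap id).foldl f d := by
  intro g
  induction g with
  | nil => intro d; rfl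
  | cons row rest ih =>
    intro d
    simp only [List.foldl_cons, List.flatMap_cons, id, List.foldl_append]
    exact ih _

lemma pbBest_fold (c : PySem.Dict Int Int) (hnd : c.keys.Nodup) :
    ∀ (l : List (Int × Int)), (∀ q ∈ l, q ∈ c.items) →
    ∀ (p : Int × Int), p ∈ c.items →
      (l.foldl (fun best q => if best.2 < q.2 then q else best) p).1 =
        (l.map (·.1)).foldl (fun best k' => if c.getD best 0 < c.getD k' 0 then k' else best) p.1 := by
  intro l
  induction l with
  | nil => intro _ p _; rfl
  | cons q rest ih =>
    intro hl p hp
    simp only [List.foldl_cons, List.map_cons]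
    have hq : q ∈ c.items := hl q List.mem_cons_self
    have hp' : (p.1, p.2) ∈ c.items := by simpa using hp
    have hq' : (q.1, q.2) ∈ c.items := by simpa using hq
    have hvp : c.getD p.1 0 = p.2 := PySem.Dict.getD_of_mem_items c hp' hnd 0
    have hvq : c.getD q.1 0 = q.2 := PySem.Dict.getD_of_mem_items c hq' hnd 0
    rw [hvp, hvq]
    by_cases hlt : p.2 < q.2
    · rw [if_pos hlt, if_pos hlt]
      exact ih (fun x hx => hl x (List.mem_cons_of_mem _ hx)) q hq
    · rw [if_neg hlt, if_neg hlt]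
      exact ih (fun x hx => hl x (List.mem_cons_of_mem _ hx)) p hp

lemma pbPick_eq_mostCommon (c : PySem.Dict Int Int) (hnd : c.keys.Nodup) :
    pbPick c = pvMostCommon c := by
  unfold pbPick pvMostCommon
  have hkeys : c.keys = c.items.map (·.1) := rfl
  match hitems : c.items with
  | [] => rw [hkeys, hitems, List.map_nil]
  | p :: rest =>
    rw [hkeys, hitems, List.map_cons]
    simp only
    rw [← pbBest_fold c hnd rest (fun q hq => by rw [hitems]; exact List.mem_cons_of_mem _ hq)
      p (by rw [hitems]; exact List.mem_cons_self)]

lemma pbBg_eq (g : List (List Int)) : pbBg g = pvBg g := by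
  unfold pbBg pvBg
  have hdict : (g.flatMap id).foldl (fun (d : PySem.Dict Int Int) v => d.insert v (d.getD v 0 + 1)) PySem.Dict.empty
      = g.foldl (fun (d : PySem.Dict Int Int) row => row.foldl (fun d x => d.modify x 0 (· + 1)) d) PySem.Dict.empty :=
    ((PySem.Dict.foldl_insert_getD_add_one_eq_counter _).trans
      (PySem.Dict.counter_eq_foldl _)).trans (pbCounts_nested _ g _).symm
  rw [hdict]
  apply pbPick_eq_mostCommon
  rw [← hdict]
  rw [(PySem.Dict.foldl_insert_getD_add_one_eq_counter (g.flatMap id))]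
  exact PySem.Dict.nodup_keys_counter _

-- ---------- flood fill ----------

-- proof-side generalisation of pbNbrs over an arbitrary delta list
def pbNbrsG (g : List (List Int)) (bg h w : Int) (vis : PySem.Set (Int × Int)) (r c : Int)
    (ds : List (Int × Int)) : List (Int × Int) :=
  ds.filterMap (fun d =>
    if 0 ≤ r + d.1 ∧ r + d.1 < h ∧ 0 ≤ c + d.2 ∧ c + d.2 < w ∧
        (r + d.1, c + d.2) ∉ vis ∧ pbCell g (r + d.1) (c + d.2) ≠ bg
    then some (r + d.1, c + d.2) else none)

lemma pbNbrs_eq_G (g : List (List Int)) (bg h w : Int) (vis : PySem.Set (Int × Int)) (r c : Int) :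
    pbNbrs g bg h w vis r c = pbNbrsG g bg h w vis r c pvDs := rfl

lemma pbElig_iff (g : List (List Int)) (bg h w : Int) (vis : PySem.Set (Int × Int)) (r c : Int)
    (d : Int × Int) :
    (0 ≤ r + d.1 ∧ r + d.1 < h ∧ 0 ≤ c + d.2 ∧ c + d.2 < w ∧
        (r + d.1, c + d.2) ∉ vis ∧ pbCell g (r + d.1) (c + d.2) ≠ bg) ↔
    (0 ≤ r + d.1 ∧ r + d.1 < h ∧ 0 ≤ c + d.2 ∧ c + d.2 < w ∧
        ¬ (vis.contains (r + d.1, c + d.2) = true) ∧ pvCell g (r + d.1) (c + d.2) ≠ bg) := by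
  constructor <;> rintro ⟨h1, h2, h3, h4, h5, h6⟩ <;> refine ⟨h1, h2, h3, h4, ?_, ?_⟩
  · rw [PySem.Set.contains_iff]; exact h5
  · rwa [← pbCell_eq g h1 h3]
  · rw [← PySem.Set.contains_iff]; exact h5
  · rwa [pbCell_eq g h1 h3]

lemma pbNbrsG_add_invariant (g : List (List Int)) (bg h w : Int) (r c : Int) (n : Int × Int)
    (vis : PySem.Set (Int × Int)) (ds : List (Int × Int))
    (hn : ∀ d ∈ ds, (r + d.1, c + d.2) ≠ n) :
    pbNbrsG g bg h w (vis.add n) r c ds = pbNbrsG g bg h w vis r c ds := by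
  unfold pbNbrsG
  apply List.filterMap_congr
  intro d hd
  have hne := hn d hd
  have hmem : (r + d.1, c + d.2) ∉ vis.add n ↔ (r + d.1, c + d.2) ∉ vis := by
    rw [PySem.Set.mem_add]
    constructor
    · intro hx hm; exact hx (Or.inl hm)
    · rintro hx (hm | he)
      · exact hx hm
      · exact hne he
  by_cases hb : 0 ≤ r + d.1 ∧ r + d.1 < h ∧ 0 ≤ c + d.2 ∧ c + d.2 < w ∧
      (r + d.1, c + d.2) ∉ vis ∧ pbCell g (r + d.1) (c + d.2) ≠ bg
  · rw [if_pos hb, if_pos ⟨hb.1, hb.2.1, hb.2.2.1, hb.2.2.2.1, hmem.mpr hb.2.2.2.2.1, hb.2.2.2.2.2⟩]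
  · rw [if_neg hb, if_neg ?_]
    intro hx
    exact hb ⟨hx.1, hx.2.1, hx.2.2.1, hx.2.2.2.1, hmem.mp hx.2.2.2.2.1, hx.2.2.2.2.2⟩

lemma pbBatch (g : List (List Int)) (bg h w cr cc : Int) :
    ∀ (ds : List (Int × Int)) (vis : PySem.Set (Int × Int)) (rest : List (Int × Int)),
      (ds.map (fun d => (cr + d.1, cc + d.2))).Nodup →
      ds.foldl (pvStep g bg h w cr cc) (vis, rest) =
        (vis.update (pbNbrsG g bg h w vis cr cc ds),
         (pbNbrsG g bg h w vis cr cc ds).reverse ++ rest) := by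
  intro ds
  induction ds with
  | nil =>
    intro vis rest _
    simp [pbNbrsG, PySem.Set.update]
  | cons d ds ih =>
    intro vis rest hnd
    rw [List.map_cons, List.nodup_cons] at hnd
    have hn : ∀ d' ∈ ds, (cr + d'.1, cc + d'.2) ≠ (cr + d.1, cc + d.2) := by
      intro d' hd' he
      exact hnd.1 (he ▸ List.mem_map_of_mem hd')
    simp only [List.foldl_cons]
    by_cases hel : 0 ≤ cr + d.1 ∧ cr + d.1 < h ∧ 0 ≤ cc + d.2 ∧ cc + d.2 < w ∧
        (cr + d.1, cc + d.2) ∉ vis ∧ pbCell g (cr + d.1) (cc + d.2) ≠ bg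
    · have hstep : pvStep g bg h w cr cc (vis, rest) d =
          (vis.add (cr + d.1, cc + d.2), (cr + d.1, cc + d.2) :: rest) := by
        unfold pvStep
        rw [if_pos ((pbElig_iff g bg h w vis cr cc d).mp hel)]
      have hG : pbNbrsG g bg h w vis cr cc (d :: ds) =
          (cr + d.1, cc + d.2) :: pbNbrsG g bg h w vis cr cc ds := by
        unfold pbNbrsG
        rw [List.filterMap_cons, if_pos hel]
      rw [hstep, ih _ _ hnd.2, pbNbrsG_add_invariant g bg h w cr cc _ vis ds hn, hG,
        PySem.Set.update_cons]
      simp [List.append_assoc]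
    · have hstep : pvStep g bg h w cr cc (vis, rest) d = (vis, rest) := by
        unfold pvStep
        rw [if_neg (fun hx => hel ((pbElig_iff g bg h w vis cr cc d).mpr hx))]
      have hG : pbNbrsG g bg h w vis cr cc (d :: ds) = pbNbrsG g bg h w vis cr cc ds := by
        unfold pbNbrsG
        rw [List.filterMap_cons, if_neg hel]
      rw [hstep, ih _ _ hnd.2, hG]

lemma pvDsCells_nodup (cr cc : Int) :
    (pvDs.map (fun d => (cr + d.1, cc + d.2))).Nodup := by
  simp [pvDs, List.nodup_cons, Prod.ext_iff]

lemma pbNbrsG_bounds (g : List (List Int)) (bg h w : Int) (vis : PySem.Set (Int × Int))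
    (r c : Int) (ds : List (Int × Int)) :
    ∀ p ∈ pbNbrsG g bg h w vis r c ds, 0 ≤ p.1 ∧ p.1 < h ∧ 0 ≤ p.2 ∧ p.2 < w := by
  intro p hp
  unfold pbNbrsG at hp
  rw [List.mem_filterMap] at hp
  obtain ⟨d, _, hd⟩ := hp
  split at hd
  · rename_i hcond
    cases hd
    exact ⟨hcond.1, hcond.2.1, hcond.2.2.1, hcond.2.2.2.1⟩
  · cases hd

lemma pbFill_eq (g : List (List Int)) (bg h w : Int) :
    ∀ (fuel : Nat) (vis : PySem.Set (Int × Int)) (stk : List (Int × Int))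
      (obj : List (Int × Int × Int)),
      (∀ p ∈ stk, 0 ≤ p.1 ∧ p.1 < h ∧ 0 ≤ p.2 ∧ p.2 < w) →
      5 * pvFree h w vis + stk.length ≤ fuel →
      pbFill g bg h w fuel vis stk obj = pvDfs g bg h w vis stk obj := by
  intro fuel
  induction fuel with
  | zero =>
    intro vis stk obj _ hm
    have hstk : stk = [] := by
      cases stk with
      | nil => rfl
      | cons a t => simp only [List.length_cons] at hm; omega
    subst hstk
    rw [pbFill, pvDfs]
  | succ fuel ih =>
    intro vis stk obj hb hm
    cases stk with
    | nil => rw [pbFill, pvDfs]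
    | cons p rest =>
      obtain ⟨r, c⟩ := p
      have hbatch := pbBatch g bg h w r c pvDs vis rest (pvDsCells_nodup r c)
      rw [pbFill, pvDfs]
      rw [← pbNbrs_eq_G] at hbatch
      rw [hbatch]
      have hhead := hb (r, c) List.mem_cons_self
      rw [pbCell_eq g hhead.1 hhead.2.2.1]
      apply ih
      · intro q hq
        rcases List.mem_append.mp hq with hq' | hq'
        · exact pbNbrsG_bounds g bg h w vis r c pvDs q (by
            rw [pbNbrs_eq_G] at hq'
            exact List.mem_reverse.mp hq')
        · exact hb q (List.mem_cons_of_mem _ hq')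
      · have := pvFold_measure g bg h w r c pvDs (vis, rest)
        rw [hbatch] at this
        simp only [List.length_append, List.length_reverse, List.length_cons] at this hm ⊢
        omega

lemma pvFree_le (h w : Int) (vis : PySem.Set (Int × Int)) :
    pvFree h w vis ≤ h.toNat * w.toNat := by
  unfold pvFree
  calc ((pvAllCells h w).filter _).length ≤ (pvAllCells h w).length := List.length_filter_le _ _
  _ = h.toNat * w.toNat := by
      unfold pvAllCells
      rw [List.length_map, List.length_product, List.length_range, List.length_range]

lemma pbObjects_eq (g : List (List Int)) (bg : Int) :
    pbObjects g bg (g.length : Int) ((g.headD []).length : Int) = pvObjects g bg := by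
  unfold pbObjects pvObjects
  simp only [PySem.List.pyRange_one, sub_zero, Int.toNat_natCast, List.foldl_map, zero_add]
  congr 1
  apply PySem.List.foldl_congr_mem
  intro st r0 hr0
  rw [List.mem_range] at hr0
  apply PySem.List.foldl_congr_mem
  intro st' c0 hc0
  rw [List.mem_range] at hc0
  have hrle : (0:Int) ≤ (r0 : Int) := Int.natCast_nonneg _
  have hcle : (0:Int) ≤ (c0 : Int) := Int.natCast_nonneg _
  have hcell : pbCell g (r0 : Int) (c0 : Int) = pvCell g (r0 : Int) (c0 : Int) :=
    pbCell_eq g hrle hcle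
  by_cases hskip : ((r0 : Int), (c0 : Int)) ∈ st'.1 ∨ pbCell g (r0 : Int) (c0 : Int) = bg
  · rw [if_pos hskip, if_neg]
    intro hx
    rcases hskip with hm | he
    · exact hx.1 ((PySem.Set.contains_iff _ _).mpr hm)
    · exact hx.2 (hcell ▸ he)
  · rw [not_or] at hskip
    obtain ⟨hsk1, hsk2⟩ := hskip
    have hskip : ((r0 : Int), (c0 : Int)) ∉ st'.1 ∧ pbCell g (r0 : Int) (c0 : Int) ≠ bg := ⟨hsk1, hsk2⟩
    rw [if_neg (by
        intro hx
        rcases hx with hm | he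
        · exact hskip.1 hm
        · exact hskip.2 he),
      if_pos ⟨by
        rw [PySem.Set.contains_iff]
        exact hskip.1, hcell ▸ hskip.2⟩]
    have hfill : pbFill g bg (g.length : Int) ((g.headD []).length : Int)
        (5 * (g.length * (g.headD []).length) + 1)
        (st'.1.add ((r0 : Int), (c0 : Int))) [((r0 : Int), (c0 : Int))] [] =
        pvDfs g bg (g.length : Int) ((g.headD []).length : Int)
          (st'.1.add ((r0 : Int), (c0 : Int))) [((r0 : Int), (c0 : Int))] [] := by
      apply pbFill_eq
      · intro p hp
        rw [List.mem_singleton] at hp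
        subst hp
        refine ⟨hrle, ?_, hcle, ?_⟩
        · show (r0 : Int) < (g.length : Int)
          exact_mod_cast hr0
        · show (c0 : Int) < ((g.headD []).length : Int)
          exact_mod_cast hc0
      · have := pvFree_le (g.length : Int) ((g.headD []).length : Int)
          (st'.1.add ((r0 : Int), (c0 : Int)))
        simp only [Int.toNat_natCast] at this
        simp only [List.length_singleton]
        omega
    rw [hfill]

-- ---------- sort key ----------

lemma pbMax_aux :
    ∀ (rest : List (Int × Int × Int)) (t : Int × Int × Int),
      PySem.List.max? (t :: rest) (fun s => s.1) =
        some (rest.foldl (fun m x => if m.1 < x.1 then x else m) t) := by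
  intro rest
  induction rest with
  | nil => intro t; rfl
  | cons x rest ih =>
    intro t
    have hx := ih x
    have ht := ih t
    simp only [PySem.List.max?, List.foldl_cons] at hx ht ⊢
    by_cases hlt : t.1 < x.1
    · rw [if_pos hlt, if_pos hlt]
      exact hx
    · rw [if_neg hlt, if_neg hlt]
      exact ht

lemma pbMax_fst :
    ∀ (rest : List (Int × Int × Int)) (p : Int × Int × Int),
      (rest.foldl (fun m x => if m.1 < x.1 then x else m) p).1 =
        rest.foldl (fun m x => if m < x.1 then x.1 else m) p.1 := by
  intro rest
  induction rest with
  | nil => intro p; rfl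
  | cons x t ih =>
    intro p
    simp only [List.foldl_cons]
    by_cases hx : p.1 < x.1
    · rw [if_pos hx, if_pos hx]
      exact ih x
    · rw [if_neg hx, if_neg hx]
      exact ih p

lemma pbMaxRow_eq : pbMaxRow = pvMaxRow := by
  funext o
  unfold pbMaxRow pvMaxRow
  cases o with
  | nil => rfl
  | cons t rest =>
    rw [pbMax_aux rest t]
    exact (pbMax_fst rest t).symm

-- ---------- sliding: A's downward scan = first occupied row strictly below r ----------

lemma pvScanGo_eq (occ : PySem.Set (Int × Int)) (h c r nxt : Int)
    (hgap : ∀ p : Int, r < p → p < nxt → occ.contains (p, c) = false)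
    (hstop : nxt = h ∨ occ.contains (nxt, c) = true)
    (hnh : nxt ≤ h) :
    ∀ (fuel : Nat) (drop : Int), 0 ≤ drop → drop ≤ nxt - r - 1 → nxt - r - 1 ≤ drop + fuel →
      pvScanGo occ h c r drop fuel = nxt - r - 1 := by
  intro fuel
  induction fuel with
  | zero =>
    intro drop _ h1 h2
    have : drop = nxt - r - 1 := by omega
    simp [pvScanGo, this]
  | succ fuel ih =>
    intro drop h0 h1 h2
    by_cases hd : drop = nxt - r - 1
    · subst hd
      have hrn : r + (nxt - r - 1) + 1 = nxt := by ring
      rw [pvScanGo, if_neg]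
      rcases hstop with hnxt | hocc
      · intro hcond
        omega
      · intro hcond
        apply hcond.2
        rw [hrn, hocc]
    · have hlt : drop < nxt - r - 1 := by omega
      have hc1 : r + drop + 1 < h := by omega
      have hc2 : occ.contains (r + drop + 1, c) = false := hgap _ (by omega) (by omega)
      rw [pvScanGo, if_pos ⟨hc1, fun hcon => by rw [hc2] at hcon; exact absurd hcon (by simp)⟩]
      exact ih (drop + 1) (by omega) (by omega) (by omega)

lemma pvScanDrop_eq (occ : PySem.Set (Int × Int)) (col : List Int) (h c r : Int)
    (hsort : col.Pairwise (· ≤ ·)) (hlt : ∀ x ∈ col, x < h)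
    (hmem : ∀ x : Int, occ.contains (x, c) = true ↔ x ∈ col)
    (hr : r < h) :
    pvScanDrop occ h c r = (col[PySem.List.bisectRight col r]?.getD h) - r - 1 := by
  obtain ⟨hle, hbelow, habove⟩ := PySem.List.bisectRight_spec col r hsort
  by_cases hi : PySem.List.bisectRight col r < col.length
  · have hget : col[PySem.List.bisectRight col r]?.getD h = col[PySem.List.bisectRight col r] := by
      rw [List.getElem?_eq_getElem hi]; rfl
    set nxt := col[PySem.List.bisectRight col r]'hi with hnxt
    rw [hget]
    have hrn : r < nxt := habove _ hi le_rfl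
    have hnh : nxt < h := hlt _ (List.getElem_mem hi)
    apply pvScanGo_eq occ h c r nxt ?_ ?_ (le_of_lt hnh) _ 0 le_rfl (by omega) ?_
    · intro p hp1 hp2
      rw [← Bool.not_eq_true]
      intro hcon
      rw [hmem] at hcon
      obtain ⟨j, hj, rfl⟩ := List.mem_iff_getElem.mp hcon
      by_cases hji : j < PySem.List.bisectRight col r
      · exact absurd (hbelow j hj hji) (by omega)
      · have hnle : nxt ≤ col[j] := by
          rcases Nat.lt_or_ge (PySem.List.bisectRight col r) j with hlt' | hge
          · exact List.pairwise_iff_getElem.mp hsort _ j hi hj hlt'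
          · have hji' : j = PySem.List.bisectRight col r := by omega
            subst hji'
            exact le_refl _
        omega
    · right; rw [hmem]; exact List.getElem_mem hi
    · have h1 : nxt ≤ h := le_of_lt hnh
      have h2 : (h - r - 1 : Int) ≤ ((h - r - 1).toNat : Int) := Int.self_le_toNat _
      omega
  · have hieq : PySem.List.bisectRight col r = col.length := by omega
    have hget : col[PySem.List.bisectRight col r]?.getD h = h := by
      rw [List.getElem?_eq_none (by omega)]; rfl
    rw [hget]
    apply pvScanGo_eq occ h c r h ?_ (Or.inl rfl) le_rfl _ 0 le_rfl (by omega) ?_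
    · intro p hp1 _
      rw [← Bool.not_eq_true]
      intro hcon
      rw [hmem] at hcon
      obtain ⟨j, hj, rfl⟩ := List.mem_iff_getElem.mp hcon
      exact absurd (hbelow j hj (by omega)) (by omega)
    · have h2 : (h - r - 1 : Int) ≤ ((h - r - 1).toNat : Int) := Int.self_le_toNat _
      omega

-- per-column occupancy invariant: A's occupied set corresponds to B's sorted column lists
def pvInv (h w : Int) (occ : PySem.Set (Int × Int)) (cols : List (List Int)) : Prop :=
  (cols.length : Int) = w ∧
  (∀ ci : Nat, (cols.getD ci []).Pairwise (· ≤ ·)) ∧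
  (∀ ci : Nat, ∀ x ∈ cols.getD ci [], x < h) ∧
  (∀ p : Int × Int, occ.contains p = true ↔
    (0 ≤ p.2 ∧ p.2 < (cols.length : Int) ∧ p.1 ∈ cols.getD p.2.toNat []))

-- cell bounds carried by _objects
def pvInB (h w : Int) (t : Int × Int × Int) : Prop :=
  0 ≤ t.1 ∧ t.1 < h ∧ 0 ≤ t.2.1 ∧ t.2.1 < w

lemma pvFoldl_inv {α β : Type} {P : β → Prop} (l : List α) (f : β → α → β) (s : β)
    (hs : P s) (hf : ∀ b, ∀ a ∈ l, P b → P (f b a)) : P (l.foldl f s) := by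
  induction l generalizing s with
  | nil => exact hs
  | cons a t ih =>
    exact ih (f s a) (hf s a (List.mem_cons_self) hs)
      (fun b a' ha' hb => hf b a' (List.mem_cons_of_mem a ha') hb)

lemma pvFold_stk_bounds (g : List (List Int)) (bg h w cr cc : Int)
    (l : List (Int × Int)) (s : PySem.Set (Int × Int) × List (Int × Int))
    (hs : ∀ p ∈ s.2, 0 ≤ p.1 ∧ p.1 < h ∧ 0 ≤ p.2 ∧ p.2 < w) :
    ∀ p ∈ (l.foldl (pvStep g bg h w cr cc) s).2, 0 ≤ p.1 ∧ p.1 < h ∧ 0 ≤ p.2 ∧ p.2 < w := by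
  refine pvFoldl_inv (P := fun s => ∀ p ∈ s.2, 0 ≤ p.1 ∧ p.1 < h ∧ 0 ≤ p.2 ∧ p.2 < w) l _ s hs ?_
  intro b a _ hb
  unfold pvStep
  split
  · rename_i hcond
    intro p hp
    rcases List.mem_cons.mp hp with rfl | hp'
    · exact ⟨hcond.1, hcond.2.1, hcond.2.2.1, hcond.2.2.2.1⟩
    · exact hb p hp'
  · exact hb

lemma pvDfs_bounds (g : List (List Int)) (bg h w : Int) :
    ∀ (vis : PySem.Set (Int × Int)) (stk : List (Int × Int)) (obj : List (Int × Int × Int)),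
      (∀ p ∈ stk, 0 ≤ p.1 ∧ p.1 < h ∧ 0 ≤ p.2 ∧ p.2 < w) →
      (∀ t ∈ obj, pvInB h w t) →
      ∀ t ∈ (pvDfs g bg h w vis stk obj).2, pvInB h w t := by
  intro vis stk obj
  induction vis, stk, obj using pvDfs.induct g bg h w with
  | case1 vis obj =>
    intro _ hobj
    rw [pvDfs]
    exact hobj
  | case2 vis obj cr cc rest st ih =>
    intro hstk hobj
    rw [pvDfs]
    refine ih ?_ ?_
    · exact pvFold_stk_bounds g bg h w cr cc pvDs (vis, rest)
        (fun p hp => hstk p (List.mem_cons_of_mem _ hp))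
    · intro t ht
      rcases List.mem_append.mp ht with ht' | ht'
      · exact hobj t ht'
      · have hcc := hstk (cr, cc) (List.mem_cons_self)
        simp only [List.mem_singleton] at ht'
        subst ht'
        exact ⟨hcc.1, hcc.2.1, hcc.2.2.1, hcc.2.2.2⟩

lemma pvObjects_bounds (g : List (List Int)) (bg : Int) :
    ∀ o ∈ pvObjects g bg, ∀ t ∈ o, pvInB (g.length : Int) ((g.headD []).length : Int) t := by
  unfold pvObjects
  refine pvFoldl_inv
    (P := fun (st : PySem.Set (Int × Int) × List (List (Int × Int × Int))) =>
      ∀ o ∈ st.2, ∀ t ∈ o, pvInB (g.length : Int) ((g.headD []).length : Int) t)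
    _ _ _ (by intro o ho; simp at ho) ?_
  intro st r hr hst
  refine pvFoldl_inv
    (P := fun (st : PySem.Set (Int × Int) × List (List (Int × Int × Int))) =>
      ∀ o ∈ st.2, ∀ t ∈ o, pvInB (g.length : Int) ((g.headD []).length : Int) t)
    _ _ _ hst ?_
  intro b c hc hb
  split
  · intro o ho
    rcases List.mem_append.mp ho with ho' | ho'
    · exact hb o ho'
    · simp only [List.mem_singleton] at ho'
      subst ho'
      refine pvDfs_bounds g bg _ _ _ _ _ ?_ (by intro t ht; simp at ht)
      intro p hp
      simp only [List.mem_singleton] at hp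
      subst hp
      rw [PySem.List.mem_pyRange_one] at hr hc
      exact ⟨hr.1, hr.2, hc.1, hc.2⟩
  · exact hb

lemma pvInsert_sorted (col : List Int) (x : Int) (hs : col.Pairwise (· ≤ ·)) :
    (PySem.List.insert col ((PySem.List.bisectRight col x : Nat) : Int) x).Pairwise (· ≤ ·) := by
  obtain ⟨hle, hbelow, habove⟩ := PySem.List.bisectRight_spec col x hs
  rw [PySem.List.insert_natCast col _ x hle, List.pairwise_append]
  refine ⟨hs.sublist (List.take_sublist ..), ?_, ?_⟩
  · rw [List.pairwise_cons]
    refine ⟨?_, hs.sublist (List.drop_sublist ..)⟩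
    intro y hy
    obtain ⟨k, hk, rfl⟩ := List.mem_iff_getElem.mp hy
    rw [List.getElem_drop]
    exact le_of_lt (habove _ (by rw [List.length_drop] at hk; omega) (Nat.le_add_right ..))
  · intro a ha b hb
    obtain ⟨j, hj, rfl⟩ := List.mem_iff_getElem.mp ha
    have hjlen : j < col.length := by rw [List.length_take] at hj; omega
    have hji : j < PySem.List.bisectRight col x := by rw [List.length_take] at hj; omega
    rw [List.getElem_take]
    rcases List.mem_cons.mp hb with rfl | hb'
    · exact hbelow j hjlen hji
    · obtain ⟨k, hk, rfl⟩ := List.mem_iff_getElem.mp hb'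
      rw [List.getElem_drop]
      refine List.pairwise_iff_getElem.mp hs j _ hjlen (by rw [List.length_drop] at hk; omega) (by omega)

lemma pvInsert_mem (col : List Int) (x y : Int) (hs : col.Pairwise (· ≤ ·)) :
    y ∈ PySem.List.insert col ((PySem.List.bisectRight col x : Nat) : Int) x ↔ y = x ∨ y ∈ col := by
  obtain ⟨hle, _, _⟩ := PySem.List.bisectRight_spec col x hs
  rw [PySem.List.insert_natCast col _ x hle, List.mem_append, List.mem_cons]
  have hcol : col = List.take (PySem.List.bisectRight col x) col ++ List.drop (PySem.List.bisectRight col x) col :=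
    (List.take_append_drop ..).symm
  constructor
  · rintro (hy | rfl | hy)
    · right; rw [hcol, List.mem_append]; exact Or.inl hy
    · exact Or.inl rfl
    · right; rw [hcol, List.mem_append]; exact Or.inr hy
  · rintro (rfl | hy)
    · exact Or.inr (Or.inl rfl)
    · rw [hcol, List.mem_append] at hy
      rcases hy with hy | hy
      · exact Or.inl hy
      · exact Or.inr (Or.inr hy)

lemma pvPlace_inv (h w : Int) (occ : PySem.Set (Int × Int)) (cols : List (List Int))
    (hinv : pvInv h w occ cols) (row c : Int)
    (hc0 : 0 ≤ c) (hcw : c < w) (hrow : row < h) :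
    pvInv h w (occ.add (row, c))
      (cols.set c.toNat (PySem.List.insert (cols.getD c.toNat [])
        ((PySem.List.bisectRight (cols.getD c.toNat []) row : Nat) : Int) row)) := by
  obtain ⟨hlen, hsort, hbnd, hcon⟩ := hinv
  have hcnat : c.toNat < cols.length := by omega
  have hget : ∀ ci : Nat,
      (cols.set c.toNat (PySem.List.insert (cols.getD c.toNat [])
        ((PySem.List.bisectRight (cols.getD c.toNat []) row : Nat) : Int) row)).getD ci [] =
      if ci = c.toNat then
        PySem.List.insert (cols.getD c.toNat [])
          ((PySem.List.bisectRight (cols.getD c.toNat []) row : Nat) : Int) row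
      else cols.getD ci [] := by
    intro ci
    by_cases hci : ci = c.toNat
    · subst hci
      rw [List.getD_eq_getElem?_getD, List.getElem?_set_self hcnat, if_pos rfl]
      rfl
    · rw [List.getD_eq_getElem?_getD, List.getElem?_set_ne (fun he => hci he.symm),
        ← List.getD_eq_getElem?_getD, if_neg hci]
  refine ⟨by rw [List.length_set]; exact hlen, ?_, ?_, ?_⟩
  · intro ci
    rw [hget ci]
    by_cases hci : ci = c.toNat
    · rw [if_pos hci]
      exact pvInsert_sorted _ row (hsort c.toNat)
    · rw [if_neg hci]
      exact hsort ci
  · intro ci x hx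
    rw [hget ci] at hx
    by_cases hci : ci = c.toNat
    · rw [if_pos hci] at hx
      rcases (pvInsert_mem _ row x (hsort c.toNat)).mp hx with rfl | hx'
      · exact hrow
      · exact hbnd c.toNat x hx'
    · rw [if_neg hci] at hx
      exact hbnd ci x hx
  · intro p
    rw [pvContains_add, Bool.or_eq_true, decide_eq_true_eq, hcon p, List.length_set, hget p.2.toNat]
    by_cases hp2 : p.2 = c
    · rw [if_pos (by rw [hp2])]
      have hpc : p = (row, c) ↔ p.1 = row := by
        rw [Prod.ext_iff]
        simp [hp2]
      rw [hpc, pvInsert_mem _ row p.1 (hsort c.toNat)]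
      constructor
      · rintro (⟨_, _, hm⟩ | rfl)
        · exact ⟨by omega, by omega, Or.inr (by rw [hp2] at hm; exact hm)⟩
        · exact ⟨by omega, by omega, Or.inl rfl⟩
      · rintro ⟨_, _, rfl | hm⟩
        · exact Or.inr rfl
        · exact Or.inl ⟨by omega, by omega, by rw [hp2]; exact hm⟩
    · have hne : ¬ (p = (row, c)) := fun he => hp2 (by rw [he])
      by_cases hp0 : 0 ≤ p.2
      · have hnat : p.2.toNat ≠ c.toNat := fun he => hp2 (by omega)
        rw [if_neg hnat]
        constructor
        · rintro (hm | he)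
          · exact hm
          · exact absurd he hne
        · exact fun hm => Or.inl hm
      · constructor
        · rintro (⟨h0, _, _⟩ | he)
          · exact absurd h0 hp0
          · exact absurd he hne
        · rintro ⟨h0, _, _⟩
          exact absurd h0 hp0

lemma pvFoldl_min_le_acc {α : Type} (f : α → Int) (l : List α) (a : Int) :
    l.foldl (fun acc x => min acc (f x)) a ≤ a := by
  induction l generalizing a with
  | nil => exact le_refl _
  | cons x t ih => exact le_trans (ih _) (min_le_left ..)

lemma pvFoldl_min_le {α : Type} (f : α → Int) (l : List α) (a : Int) :
    ∀ t ∈ l, l.foldl (fun acc x => min acc (f x)) a ≤ f t := by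
  induction l generalizing a with
  | nil => intro t ht; simp at ht
  | cons x t ih =>
    intro t' ht'
    rcases List.mem_cons.mp ht' with rfl | ht''
    · simp only [List.foldl_cons]
      exact le_trans (pvFoldl_min_le_acc f t _) (min_le_right ..)
    · simp only [List.foldl_cons]
      exact ih _ t' ht''

lemma pvFoldl_min_nonneg {α : Type} (f : α → Int) (l : List α) (a : Int)
    (hf : ∀ x ∈ l, 0 ≤ f x) (ha : 0 ≤ a) :
    0 ≤ l.foldl (fun acc x => min acc (f x)) a := by
  induction l generalizing a with
  | nil => exact ha
  | cons x t ih =>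
    simp only [List.foldl_cons]
    exact ih _ (fun y hy => hf y (List.mem_cons_of_mem _ hy))
      (le_min ha (hf x List.mem_cons_self))

lemma pvDrop_cell_eq (h w : Int) (occ : PySem.Set (Int × Int)) (cols : List (List Int))
    (hinv : pvInv h w occ cols) (r c : Int)
    (hc0 : 0 ≤ c) (hcw : c < w) (hr : r < h) :
    pvScanDrop occ h c r =
      ((cols.getD c.toNat [])[PySem.List.bisectRight (cols.getD c.toNat []) r]?.getD h) - r - 1 := by
  obtain ⟨hlen, hsort, hbnd, hcon⟩ := hinv
  refine pvScanDrop_eq occ (cols.getD c.toNat []) h c r (hsort c.toNat) (hbnd c.toNat) ?_ hr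
  intro x
  rw [hcon (x, c)]
  constructor
  · rintro ⟨_, _, hm⟩
    exact hm
  · intro hm
    exact ⟨hc0, by omega, hm⟩

lemma pvCellVal_le (h : Int) (col : List Int) (r : Int)
    (hbnd : ∀ x ∈ col, x < h) :
    (col[PySem.List.bisectRight col r]?.getD h) ≤ h := by
  by_cases hi : PySem.List.bisectRight col r < col.length
  · rw [List.getElem?_eq_getElem hi]
    exact le_of_lt (hbnd _ (List.getElem_mem hi))
  · rw [List.getElem?_eq_none (by omega)]
    exact le_refl _

lemma pbDropTerm_nonneg (h : Int) (col : List Int) (r : Int)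
    (hsort : col.Pairwise (· ≤ ·)) (hr : r < h) :
    0 ≤ (col[PySem.List.bisectRight col r]?.getD h) - r - 1 := by
  obtain ⟨hle, hbelow, habove⟩ := PySem.List.bisectRight_spec col r hsort
  by_cases hi : PySem.List.bisectRight col r < col.length
  · rw [List.getElem?_eq_getElem hi]
    have := habove _ hi le_rfl
    simp only [Option.getD_some]
    omega
  · rw [List.getElem?_eq_none (by omega)]
    simp only [Option.getD_none]
    omega

-- ---------- rendering the placement dict ----------

lemma pbRender_empty (h w bg : Int) :
    pbRender h w PySem.Dict.empty bg = List.replicate h.toNat (List.replicate w.toNat bg) := by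
  unfold pbRender
  rw [List.eq_replicate_iff]
  constructor
  · rw [List.length_map, List.length_range]
  · intro row hrow
    rw [List.mem_map] at hrow
    obtain ⟨r, _, rfl⟩ := hrow
    rw [List.eq_replicate_iff]
    constructor
    · rw [List.length_map, List.length_range]
    · intro x hx
      rw [List.mem_map] at hx
      obtain ⟨c, _, rfl⟩ := hx
      exact PySem.Dict.getD_empty _ _

lemma pbRender_insert (h w : Int) (placed : PySem.Dict (Int × Int) Int) (bg ri ci v : Int)
    (h0 : 0 ≤ ri) (h1 : ri < h) (h2 : 0 ≤ ci) (h3 : ci < w) :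
    pbRender h w (placed.insert (ri, ci) v) bg = pvSet2 (pbRender h w placed bg) ri ci v := by
  unfold pvSet2
  rw [PySem.List.pyGetD_of_nonneg _ _ h0, PySem.List.pySetD_of_nonneg _ _ h2,
    PySem.List.pySetD_of_nonneg _ _ h0]
  have hriN : ri.toNat < h.toNat := by omega
  have hciN : ci.toNat < w.toNat := by omega
  have hlen : ∀ (d : PySem.Dict (Int × Int) Int), (pbRender h w d bg).length = h.toNat := by
    intro d
    unfold pbRender
    rw [List.length_map, List.length_range]
  have hrow : ∀ (d : PySem.Dict (Int × Int) Int) (i : Nat) (hi : i < (pbRender h w d bg).length),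
      (pbRender h w d bg)[i] =
        (List.range w.toNat).map (fun (c : Nat) => d.getD ((i : Int), (c : Int)) bg) := by
    intro d i hi
    unfold pbRender
    rw [List.getElem_map, List.getElem_range]
  have hrowD : (pbRender h w placed bg).getD ri.toNat [] =
      (List.range w.toNat).map (fun (c : Nat) => placed.getD ((ri.toNat : Int), (c : Int)) bg) := by
    rw [List.getD_eq_getElem (pbRender h w placed bg) [] (by rw [hlen]; exact hriN)]
    exact hrow placed ri.toNat (by rw [hlen]; exact hriN)
  apply List.ext_getElem
  · rw [hlen, List.length_set, hlen]
  · intro i hi hi'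
    rw [hrow _ i hi, List.getElem_set]
    by_cases hieq : ri.toNat = i
    · rw [if_pos hieq]
      subst hieq
      rw [hrowD]
      apply List.ext_getElem
      · rw [List.length_map, List.length_range, List.length_set, List.length_map, List.length_range]
      · intro j hj hj'
        rw [List.length_map, List.length_range] at hj
        rw [List.getElem_map, List.getElem_range, List.getElem_set]
        have hcastr : ((ri.toNat : Nat) : Int) = ri := Int.toNat_of_nonneg h0
        by_cases hjeq : ci.toNat = j
        · rw [if_pos hjeq]
          subst hjeq
          have hkey : (((ri.toNat : Nat) : Int), ((ci.toNat : Nat) : Int)) = (ri, ci) := by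
            rw [hcastr, Int.toNat_of_nonneg h2]
          rw [hkey, PySem.Dict.getD_insert, if_pos rfl]
        · rw [if_neg hjeq, List.getElem_map, List.getElem_range,
            PySem.Dict.getD_insert, if_neg ?_]
          intro hcon
          rw [Prod.ext_iff] at hcon
          have := hcon.2
          simp only at this
          omega
    · rw [if_neg hieq, hrow _ i (by rw [hlen]; rw [hlen] at hi; exact hi)]
      apply List.map_congr_left
      intro c _
      rw [PySem.Dict.getD_insert, if_neg ?_]
      intro hcon
      rw [Prod.ext_iff] at hcon
      have := hcon.1
      simp only at this
      omega

-- ---------- the sliding phase, object by object ----------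

lemma pbPlace_fold (h w bg d : Int) (hd0 : 0 ≤ d) :
    ∀ (obj : List (Int × Int × Int)), (∀ t ∈ obj, pvInB h w t) → (∀ t ∈ obj, t.1 + d < h) →
    ∀ (res : List (List Int)) (occ : PySem.Set (Int × Int)) (cols : List (List Int))
      (placed : PySem.Dict (Int × Int) Int),
      res = pbRender h w placed bg → pvInv h w occ cols →
      (obj.foldl (fun (st : List (List Int) × PySem.Set (Int × Int)) t =>
          (pvSet2 st.1 (t.1 + d) t.2.1 t.2.2, st.2.add (t.1 + d, t.2.1))) (res, occ)).1 =
        pbRender h w (obj.foldl (fun (st : List (List Int) × PySem.Dict (Int × Int) Int) t =>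
          (st.1.set t.2.1.toNat
             (PySem.List.insert (st.1.getD t.2.1.toNat [])
               ((PySem.List.bisectRight (st.1.getD t.2.1.toNat []) (t.1 + d) : Nat) : Int) (t.1 + d)),
           st.2.insert (t.1 + d, t.2.1) t.2.2)) (cols, placed)).2 bg ∧
      pvInv h w
        (obj.foldl (fun (st : List (List Int) × PySem.Set (Int × Int)) t =>
          (pvSet2 st.1 (t.1 + d) t.2.1 t.2.2, st.2.add (t.1 + d, t.2.1))) (res, occ)).2
        (obj.foldl (fun (st : List (List Int) × PySem.Dict (Int × Int) Int) t =>
          (st.1.set t.2.1.toNat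
             (PySem.List.insert (st.1.getD t.2.1.toNat [])
               ((PySem.List.bisectRight (st.1.getD t.2.1.toNat []) (t.1 + d) : Nat) : Int) (t.1 + d)),
           st.2.insert (t.1 + d, t.2.1) t.2.2)) (cols, placed)).1 := by
  intro obj
  induction obj with
  | nil =>
    intro _ _ res occ cols placed hres hinv
    exact ⟨hres.trans rfl, hinv⟩
  | cons t rest ih =>
    intro hobj hd res occ cols placed hres hinv
    simp only [List.foldl_cons]
    have hib := hobj t (List.mem_cons_self)
    have hth : t.1 + d < h := hd t (List.mem_cons_self)
    have ht0 : 0 ≤ t.1 + d := by have := hib.1; omega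
    refine ih (fun s hs => hobj s (List.mem_cons_of_mem _ hs))
      (fun s hs => hd s (List.mem_cons_of_mem _ hs)) _ _ _ _ ?_ ?_
    · rw [hres, ← pbRender_insert h w placed bg (t.1 + d) t.2.1 t.2.2 ht0 hth hib.2.2.1 hib.2.2.2]
    · exact pvPlace_inv h w occ cols hinv (t.1 + d) t.2.1 hib.2.2.1 hib.2.2.2 hth

lemma pbMain (h w bg : Int) (hh : 0 ≤ h) :
    ∀ (objs : List (List (Int × Int × Int))),
      (∀ o ∈ objs, ∀ t ∈ o, pvInB h w t) →
      ∀ (resA : List (List Int)) (occ : PySem.Set (Int × Int)) (cols : List (List Int))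
        (placed : PySem.Dict (Int × Int) Int),
        resA = pbRender h w placed bg → pvInv h w occ cols →
        (objs.foldl (fun (st : List (List Int) × PySem.Set (Int × Int)) obj =>
            obj.foldl (fun st' t =>
                (pvSet2 st'.1 (t.1 + obj.foldl (fun md t => min md (pvScanDrop st.2 h t.2.1 t.1)) h) t.2.1 t.2.2,
                 st'.2.add (t.1 + obj.foldl (fun md t => min md (pvScanDrop st.2 h t.2.1 t.1)) h, t.2.1))) st)
          (resA, occ)).1 =
        pbRender h w
          ((objs.foldl (fun (st : List (List Int) × PySem.Dict (Int × Int) Int) obj =>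
            obj.foldl (fun st' t =>
                (st'.1.set t.2.1.toNat
                   (PySem.List.insert (st'.1.getD t.2.1.toNat [])
                     ((PySem.List.bisectRight (st'.1.getD t.2.1.toNat [])
                       (t.1 + obj.foldl (fun dd t => min dd ((st.1.getD t.2.1.toNat [])[PySem.List.bisectRight (st.1.getD t.2.1.toNat []) t.1]?.getD h - t.1 - 1)) h) : Nat) : Int)
                     (t.1 + obj.foldl (fun dd t => min dd ((st.1.getD t.2.1.toNat [])[PySem.List.bisectRight (st.1.getD t.2.1.toNat []) t.1]?.getD h - t.1 - 1)) h)),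
                 st'.2.insert
                   (t.1 + obj.foldl (fun dd t => min dd ((st.1.getD t.2.1.toNat [])[PySem.List.bisectRight (st.1.getD t.2.1.toNat []) t.1]?.getD h - t.1 - 1)) h, t.2.1)
                   t.2.2)) st)
          (cols, placed)).2) bg := by
  intro objs
  induction objs with
  | nil =>
    intro _ resA occ cols placed hres _
    exact hres
  | cons o rest ih =>
    intro hobjs resA occ cols placed hres hinv
    simp only [List.foldl_cons]
    have ho := hobjs o (List.mem_cons_self)
    have hdeq : o.foldl (fun md t => min md (pvScanDrop occ h t.2.1 t.1)) h =
        o.foldl (fun dd t => min dd ((cols.getD t.2.1.toNat [])[PySem.List.bisectRight (cols.getD t.2.1.toNat []) t.1]?.getD h - t.1 - 1)) h := by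
      refine PySem.List.foldl_congr_mem _ _ _ _ ?_
      intro acc t ht
      have hib := ho t ht
      rw [pvDrop_cell_eq h w occ cols hinv t.1 t.2.1 hib.2.2.1 hib.2.2.2 hib.2.1]
    rw [hdeq]
    set d := o.foldl (fun dd t => min dd ((cols.getD t.2.1.toNat [])[PySem.List.bisectRight (cols.getD t.2.1.toNat []) t.1]?.getD h - t.1 - 1)) h with hdDef
    obtain ⟨hlen, hsort, hbnd, hcon⟩ := hinv
    have hd0 : 0 ≤ d := by
      rw [hdDef]
      refine pvFoldl_min_nonneg _ o h ?_ ?_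
      · intro t ht
        exact pbDropTerm_nonneg h _ t.1 (hsort t.2.1.toNat) (ho t ht).2.1
      · exact hh
    have hd : ∀ t ∈ o, t.1 + d < h := by
      intro t ht
      have h1 : d ≤ (cols.getD t.2.1.toNat [])[PySem.List.bisectRight (cols.getD t.2.1.toNat []) t.1]?.getD h - t.1 - 1 := by
        rw [hdDef]
        exact pvFoldl_min_le _ o h t ht
      have h2 := pvCellVal_le h (cols.getD t.2.1.toNat []) t.1 (hbnd t.2.1.toNat)
      omega
    obtain ⟨hres', hinv'⟩ := pbPlace_fold h w bg d hd0 o ho hd resA occ cols placed hres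
      ⟨hlen, hsort, hbnd, hcon⟩
    exact ih (fun o' ho' => hobjs o' (List.mem_cons_of_mem _ ho')) _ _ _ _ hres' hinv'

lemma pvInv_init (h w : Int) (hw : 0 ≤ w) :
    pvInv h w PySem.Set.empty (List.replicate w.toNat []) := by
  have hget : ∀ ci : Nat, (List.replicate w.toNat ([] : List Int)).getD ci [] = [] := by
    intro ci
    rw [List.getD_eq_getElem?_getD, List.getElem?_replicate]
    split <;> rfl
  refine ⟨by rw [List.length_replicate]; omega, ?_, ?_, ?_⟩
  · intro ci; rw [hget ci]; exact List.Pairwise.nil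
  · intro ci x hx; rw [hget ci] at hx; simp at hx
  · intro p
    constructor
    · intro hcon
      simp [PySem.Set.empty, PySem.Set.contains] at hcon
    · rintro ⟨_, _, hm⟩
      rw [hget p.2.toNat] at hm
      simp at hm

-- ===== VERDICT (by name: the statement is the Claim_ definition above) =====
theorem slide_objs_to_touch_spec : Claim_equal_slide_objs_to_touch := by
  unfold Claim_equal_slide_objs_to_touch
  intro g _ _
  unfold Spec_slide_objs_to_touch
  simp only [slide_objs_to_touch, slide_objs_to_touch_alt, pbBg_eq, pbObjects_eq, pbMaxRow_eq]
  refine pbMain (g.length : Int) ((g.headD []).length : Int) (pvBg g) (by positivity) _ ?_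
    _ _ _ _ (pbRender_empty _ _ _).symm (pvInv_init _ _ (by positivity))
  intro o ho
  rw [PySem.List.mem_sorted] at ho
  exact pvObjects_bounds g (pvBg g) o ho
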